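-- pv_equiv track=rewrite | github.com/wanglongjiang/leetcode | vip/medium/1772-sort-features-by-popularity.py | sortFeatures
-- ===== SOURCE A (Python) =====
-- from typing import List
--
-- def sortFeatures(features: List[str], responses: List[str]) -> List[str]:
--     allFeatures = {}
--     for f in features:
--         allFeatures[f] = 0
--     for line in responses:
--         for word in set(line.split(' ')):  # 句子拆分成单词，然后用集合去重
--             if word in allFeatures:
--                 allFeatures[word] += 1  # 计数+1
--     return list(map(lambda p: p[1], sorted(map(lambda p: (-p[1], p[0]), allFeatures.items()))))  # 按照计数的从大到小，单词字典序排序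
-- ===== SOURCE B (Python) =====
-- from typing import List
--
-- def sortFeatures(features: List[str], responses: List[str]) -> List[str]:
--     sets = [set(r.split(' ')) for r in responses]
--     uniq = list(dict.fromkeys(features))
--     def popularity(f):
--         return sum(1 for ws in sets if f in ws)
--     return sorted(uniq, key=lambda f: (-popularity(f), f))
-- ===== Notes on version B (the rewrite author's own statement) =====
-- stated objective: alternative
-- what changed: A builds a counting dict in one pass over responses incrementing matched words and then sorts negated (count, word) tuples; B pre-splits each response into a word set, dedups features with dict.fromkeys, counts each feature by a scan over the response sets, and sorts the deduped features directly with a (-count, name) key.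
import Mathlib
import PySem

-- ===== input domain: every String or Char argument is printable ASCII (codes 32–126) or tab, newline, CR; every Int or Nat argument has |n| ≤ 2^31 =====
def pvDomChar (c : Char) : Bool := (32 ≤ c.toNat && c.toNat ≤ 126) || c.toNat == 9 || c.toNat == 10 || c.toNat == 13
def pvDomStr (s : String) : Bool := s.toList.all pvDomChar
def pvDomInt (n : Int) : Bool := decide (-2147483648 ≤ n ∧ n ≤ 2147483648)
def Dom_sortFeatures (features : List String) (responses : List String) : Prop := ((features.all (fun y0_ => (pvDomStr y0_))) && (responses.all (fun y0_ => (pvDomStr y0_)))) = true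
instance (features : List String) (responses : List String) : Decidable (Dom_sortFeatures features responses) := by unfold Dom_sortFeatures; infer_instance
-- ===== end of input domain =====

-- B re-decomposes A: instead of one counting-dict pass over responses, B pre-splits each
-- response into a word set, dedups features, counts each feature by scanning the sets, and
-- sorts the deduped features by a (-count, name) key ("alternative": same cost, different shape).

-- ===== PORT A =====
-- line.split(' ') with a nonempty separator never raises: split? is `some` here, .getD [] is exact.
def sortFeatures (features : List String) (responses : List String) : List String :=
  let d0 : PySem.Dict String Int :=
    features.foldl (fun d f => d.insert f 0) PySem.Dict.empty
  let d1 : PySem.Dict String Int :=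
    responses.foldl (fun d line =>
      (PySem.Set.ofList ((PySem.Str.split? line " ").getD [])).foldl
        (fun d word => if d.contains word then d.modify word 0 (· + 1) else d) d) d0
  (PySem.List.sorted2 (d1.items.map (fun p => (-p.2, p.1)))
      (fun p => p.1) (fun p => p.2)).map (fun p => p.2)

-- ===== PORT B =====
def sortFeatures_alt (features : List String) (responses : List String) : List String :=
  let sets : List (PySem.Set String) :=
    responses.map (fun r => PySem.Set.ofList ((PySem.Str.split? r " ").getD []))
  let uniq : List String := PySem.List.dedup features
  let popularity : String → Int := fun f => ((sets.countP (fun ws => PySem.Set.contains ws f) : Nat) : Int)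
  PySem.List.sorted2 uniq (fun f => -popularity f) (fun f => f)

-- ===== PRECONDITION & SPEC =====
def Spec_sortFeatures (features : List String) (responses : List String) (out : List String) : Prop := out = sortFeatures_alt features responses
instance (features : List String) (responses : List String) (out : List String) : Decidable (Spec_sortFeatures features responses out) := by unfold Spec_sortFeatures; infer_instance

-- ===== CLAIM (what is proved, stated in full; the proofs are below) =====
def Claim_equal_sortFeatures : Prop := ∀ (features : List String) (responses : List String), Dom_sortFeatures features responses → Spec_sortFeatures features responses (sortFeatures features responses)

-- ===== LEMMAS AND PROOFS =====

-- the inner word loop of A, and the set a response contributes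
def pvStep (d : PySem.Dict String Int) (w : String) : PySem.Dict String Int :=
  if d.contains w then d.modify w 0 (· + 1) else d

def pvWords (r : String) : List String := PySem.Set.ofList ((PySem.Str.split? r " ").getD [])

lemma pvStep_keys (d : PySem.Dict String Int) (w : String) : (pvStep d w).keys = d.keys := by
  unfold pvStep
  split
  · rename_i h
    rw [PySem.Dict.keys_modify, PySem.Dict.keys_insert_of_contains _ _ h]
  · rfl

lemma inner_keys (S : List String) (d : PySem.Dict String Int) :
    (S.foldl pvStep d).keys = d.keys := by
  induction S generalizing d with
  | nil => rfl
  | cons w S ih => simp [List.foldl_cons, ih, pvStep_keys]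

lemma inner_getD (S : List String) (d : PySem.Dict String Int) (v : String)
    (hv : d.contains v = true) :
    (S.foldl pvStep d).getD v 0 = d.getD v 0 + (S.count v : Int) := by
  induction S generalizing d with
  | nil => simp
  | cons w S ih =>
    have hkeys : (pvStep d w).keys = d.keys := pvStep_keys d w
    have hv' : (pvStep d w).contains v = true := by
      rw [PySem.Dict.contains_iff_mem_keys, hkeys, ← PySem.Dict.contains_iff_mem_keys]
      exact hv
    rw [List.foldl_cons, ih _ hv']
    by_cases hwv : w = v
    · subst hwv
      have : pvStep d w = d.modify w 0 (· + 1) := by unfold pvStep; rw [hv]; rfl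
      rw [this, PySem.Dict.getD_modify_self, List.count_cons_self]
      push_cast
      ring
    · have hne : v ≠ w := fun h => hwv h.symm
      have hval : (pvStep d w).getD v 0 = d.getD v 0 := by
        unfold pvStep
        split
        · exact PySem.Dict.getD_modify_of_ne _ _ _ hne
        · rfl
      rw [hval, List.count_cons_of_ne (Ne.symm hne)]

lemma outer_keys (rs : List String) (d : PySem.Dict String Int) :
    (rs.foldl (fun d line => (pvWords line).foldl pvStep d) d).keys = d.keys := by
  induction rs generalizing d with
  | nil => rfl
  | cons r rs ih => simp [List.foldl_cons, ih, inner_keys]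

lemma outer_getD (rs : List String) (d : PySem.Dict String Int) (v : String)
    (hv : d.contains v = true) :
    (rs.foldl (fun d line => (pvWords line).foldl pvStep d) d).getD v 0
      = d.getD v 0 + ((rs.countP (fun r => PySem.Set.contains (PySem.Set.ofList ((PySem.Str.split? r " ").getD [])) v) : Nat) : Int) := by
  induction rs generalizing d with
  | nil => simp
  | cons r rs ih =>
    have hv' : ((pvWords r).foldl pvStep d).contains v = true := by
      rw [PySem.Dict.contains_iff_mem_keys, inner_keys, ← PySem.Dict.contains_iff_mem_keys]
      exact hv
    rw [List.foldl_cons, ih _ hv', inner_getD _ _ _ hv, List.countP_cons]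
    have hcnt : List.count v (pvWords r)
        = if (PySem.Set.ofList ((PySem.Str.split? r " ").getD [])).contains v = true then 1 else 0 := by
      simp only [pvWords]
      by_cases hm : v ∈ PySem.Set.ofList ((PySem.Str.split? r " ").getD [])
      · rw [List.count_eq_one_of_mem (PySem.Set.nodup_ofList _) hm,
            if_pos ((PySem.Set.contains_iff _ _).mpr hm)]
      · rw [List.count_eq_zero.mpr hm,
            if_neg (fun h => hm ((PySem.Set.contains_iff _ _).mp h))]
    rw [hcnt]
    split <;> push_cast <;> ring

lemma d0_keys (features : List String) :
    (features.foldl (fun d f => d.insert f (0 : Int)) PySem.Dict.empty).keys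
      = PySem.List.dedup features := by
  rw [PySem.Dict.keys_foldl_insert features (fun _ _ => 0) PySem.Dict.empty,
      PySem.List.dedup_eq_ofList]
  rw [PySem.Dict.keys_empty]
  exact PySem.Set.update_empty features

lemma d0_getD (features : List String) (v : String) :
    (features.foldl (fun d f => d.insert f (0 : Int)) PySem.Dict.empty).getD v 0 = 0 := by
  have h : ∀ (d : PySem.Dict String Int), (∀ u, d.getD u 0 = 0) →
      ∀ u, (features.foldl (fun d f => d.insert f (0 : Int)) d).getD u 0 = 0 := by
    induction features with
    | nil => intro d hd u; exact hd u
    | cons f fs ih =>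
      intro d hd u
      rw [List.foldl_cons]
      refine ih _ (fun u => ?_) u
      rw [PySem.Dict.getD_insert]
      split <;> simp [hd]
  exact h PySem.Dict.empty (fun u => PySem.Dict.getD_empty u 0) v

lemma insertBy_map {α β : Type} (g : α → β) (bf : β → β → Bool) (x : α) (ys : List α) :
    PySem.List.insertBy bf (g x) (ys.map g)
      = (PySem.List.insertBy (fun a b => bf (g a) (g b)) x ys).map g := by
  induction ys with
  | nil => rfl
  | cons y ys ih =>
    simp only [List.map_cons, PySem.List.insertBy]
    split <;> simp_all

lemma foldl_insertBy_map {α β : Type} (g : α → β) (bf : β → β → Bool) (xs : List α)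
    (acc : List α) :
    (xs.map g).foldl (fun acc x => PySem.List.insertBy bf x acc) (acc.map g)
      = (xs.foldl (fun acc x => PySem.List.insertBy (fun a b => bf (g a) (g b)) x acc) acc).map g := by
  induction xs generalizing acc with
  | nil => rfl
  | cons x xs ih => rw [List.map_cons, List.foldl_cons, List.foldl_cons, insertBy_map, ih]

-- sorted2 commutes with map: sorting the g-images by component keys is mapping g over
-- sorting the originals by the composed keys
lemma sorted2_map {α β κ₁ κ₂ : Type} [LT κ₁] [DecidableLT κ₁] [LT κ₂] [DecidableLT κ₂]
    (g : α → β) (k1 : β → κ₁) (k2 : β → κ₂) (xs : List α) :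
    PySem.List.sorted2 (xs.map g) k1 k2
      = (PySem.List.sorted2 xs (fun a => k1 (g a)) (fun a => k2 (g a))).map g := by
  unfold PySem.List.sorted2
  simp only [if_neg (by decide : ¬ (false = true))]
  have := foldl_insertBy_map g
    (fun a b => decide (k1 a < k1 b) || !decide (k1 b < k1 a) && decide (k2 a < k2 b)) xs []
  simpa using this

theorem sortFeatures_eq_alt (features responses : List String) :
    sortFeatures features responses = sortFeatures_alt features responses := by
  unfold sortFeatures sortFeatures_alt
  simp only []
  set uniq := PySem.List.dedup features with huniq
  set pop : String → Int := fun f =>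
    (((responses.map (fun r => PySem.Set.ofList ((PySem.Str.split? r " ").getD []))).countP
        (fun ws => PySem.Set.contains ws f) : Nat) : Int) with hpop
  set d0 := features.foldl (fun d f => d.insert f (0 : Int)) PySem.Dict.empty with hd0
  set d1 := responses.foldl (fun d line =>
      (PySem.Set.ofList ((PySem.Str.split? line " ").getD [])).foldl
        (fun d word => if d.contains word then d.modify word 0 (· + 1) else d) d) d0 with hd1
  have hd1' : d1 = responses.foldl (fun d line => (pvWords line).foldl pvStep d) d0 := by
    rw [hd1]; rfl
  have hkeys1 : d1.keys = uniq := by rw [hd1', outer_keys, hd0, d0_keys, huniq]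
  have hnodup : d1.keys.Nodup := by rw [hkeys1, huniq]; exact PySem.List.nodup_dedup features
  have hitems : d1.items = uniq.map (fun f => (f, pop f)) := by
    rw [PySem.Dict.items_eq_map_keys d1 hnodup 0, hkeys1]
    refine List.map_congr_left (fun f hf => ?_)
    have hc : d0.contains f = true := by
      rw [PySem.Dict.contains_iff_mem_keys, hd0, d0_keys]; exact hf
    rw [hd1', outer_getD _ _ _ hc, hd0, d0_getD, zero_add, hpop]
    simp only [List.countP_map]
    congr 1
  rw [hitems, List.map_map]
  have hg : ((fun p => (-p.2, p.1)) ∘ (fun f => (f, pop f))) = (fun f => ((-(pop f), f) : Int × String)) := rfl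
  rw [hg, sorted2_map (fun f => ((-(pop f), f) : Int × String)) (fun p => p.1) (fun p => p.2) uniq]
  rw [List.map_map]
  show List.map (fun f => f) (PySem.List.sorted2 uniq (fun a => -pop a) fun a => a) = _
  rw [List.map_id']

-- ===== VERDICT (by name: the statement is the Claim_ definition above) =====
theorem sortFeatures_spec : Claim_equal_sortFeatures := by
  intro features responses _
  unfold Spec_sortFeatures
  exact sortFeatures_eq_alt features responses
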